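-- pv_equiv track=rewrite | github.com/FedePodio/AWS-Repository | Misc/robacorsoPython/esercizi v2/es2.py | elabora_numeri
-- ===== SOURCE A (Python) =====
-- def elabora_numeri(numeri: int):
--     somma_pari = 0
--     prodotto_dispari = 1
--     ha_dispari = False
--
--     for n in numeri:
--         if n % 2 == 0:
--             somma_pari += n
--         else:
--             prodotto_dispari= n
--             ha_dispari = True
--
--     if not ha_dispari: prodotto_dispari = 0
--     return somma_pari, prodotto_dispari
-- ===== SOURCE B (Python) =====
-- def elabora_numeri(numeri: int):
--     nums = list(numeri)
--     somma_pari = sum(n for n in nums if n % 2 == 0)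
--     for n in reversed(nums):
--         if n % 2 != 0:
--             return somma_pari, n
--     return somma_pari, 0
-- ===== Notes on version B (the rewrite author's own statement) =====
-- stated objective: simpler
-- what changed: Replaces A's single fused loop with three mutable accumulators by two independent reductions: a one-pass sum over the even elements, and a reversed scan returning the first odd found (0 if none).
import Mathlib
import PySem

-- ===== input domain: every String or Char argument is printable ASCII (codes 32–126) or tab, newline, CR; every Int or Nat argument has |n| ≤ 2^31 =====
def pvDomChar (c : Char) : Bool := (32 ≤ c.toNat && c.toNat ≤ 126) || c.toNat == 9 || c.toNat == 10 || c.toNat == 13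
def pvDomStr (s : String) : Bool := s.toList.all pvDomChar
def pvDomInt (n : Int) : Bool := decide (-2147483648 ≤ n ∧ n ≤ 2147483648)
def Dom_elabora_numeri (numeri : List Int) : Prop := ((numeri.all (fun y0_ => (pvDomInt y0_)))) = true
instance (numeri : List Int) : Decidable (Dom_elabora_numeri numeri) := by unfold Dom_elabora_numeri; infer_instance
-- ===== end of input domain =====

-- B replaces A's single fused loop (three mutable accumulators) with two independent
-- reductions: a sum over the even elements and a reversed scan for the last odd (simpler).

-- ===== PORT A =====
-- single loop, state (somma_pari, prodotto_dispari, ha_dispari)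
def elabora_numeri (numeri : List Int) : Int × Int :=
  let st := numeri.foldl
    (fun (st : Int × Int × Bool) n =>
      if PySem.Int.mod n 2 = 0 then (st.1 + n, st.2.1, st.2.2)
      else (st.1, n, true))
    (0, 1, false)
  if !st.2.2 then (st.1, 0) else (st.1, st.2.1)

-- ===== PORT B =====
-- sum of the even elements, then first odd of the reversed list (0 if none)
def elabora_numeri_alt (numeri : List Int) : Int × Int :=
  let somma_pari := (numeri.filter (fun n => PySem.Int.mod n 2 = 0)).foldl (· + ·) 0
  match numeri.reverse.find? (fun n => PySem.Int.mod n 2 ≠ 0) with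
  | some n => (somma_pari, n)
  | none => (somma_pari, 0)

-- ===== PRECONDITION & SPEC =====
def Spec_elabora_numeri (numeri : List Int) (out : Int × Int) : Prop := out = elabora_numeri_alt numeri
instance (numeri : List Int) (out : Int × Int) : Decidable (Spec_elabora_numeri numeri out) := by unfold Spec_elabora_numeri; infer_instance

-- ===== CLAIM (what is proved, stated in full; the proofs are below) =====
def Claim_equal_elabora_numeri : Prop := ∀ (numeri : List Int), Dom_elabora_numeri numeri → Spec_elabora_numeri numeri (elabora_numeri numeri)

-- ===== LEMMAS AND PROOFS =====

theorem pv_foldl_add (l : List Int) (s : Int) :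
    l.foldl (· + ·) s = s + l.foldl (· + ·) 0 := by
  induction l generalizing s with
  | nil => simp
  | cons a t ih => simp [List.foldl, ih (s + a), ih a]; ring

theorem pv_sum_filter_cons (a : Int) (t : List Int) (p : Int → Bool) :
    ((a :: t).filter p).foldl (· + ·) 0 =
      (if p a then a else 0) + (t.filter p).foldl (· + ·) 0 := by
  by_cases h : p a = true
  · rw [List.filter_cons_of_pos h, List.foldl_cons, if_pos h, pv_foldl_add]
    simp
  · simp [List.filter_cons, h]

theorem pv_find_rev_cons (a : Int) (t : List Int) (p : Int → Bool) :
    (a :: t).reverse.find? p =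
      match t.reverse.find? p with
      | some n => some n
      | none => if p a then some a else none := by
  simp [List.reverse_cons, List.find?_append]
  cases t.reverse.find? p <;> simp [List.find?]

theorem pv_loop_char (l : List Int) (s p : Int) (h : Bool) :
    l.foldl
      (fun (st : Int × Int × Bool) n =>
        if PySem.Int.mod n 2 = 0 then (st.1 + n, st.2.1, st.2.2)
        else (st.1, n, true)) (s, p, h) =
      (s + (l.filter (fun n => PySem.Int.mod n 2 = 0)).foldl (· + ·) 0,
       match l.reverse.find? (fun n => PySem.Int.mod n 2 ≠ 0) with
       | some n => (n, true)
       | none => (p, h)) := by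
  induction l generalizing s p h with
  | nil => simp
  | cons a t ih =>
    rw [pv_sum_filter_cons, pv_find_rev_cons, List.foldl_cons]
    by_cases ha : PySem.Int.mod a 2 = 0
    · rw [if_pos ha]
      simp only [ha, ih]
      cases t.reverse.find? (fun n => PySem.Int.mod n 2 ≠ 0) <;>
        simp [add_assoc]
    · rw [if_neg ha]
      have h2 : Int.fmod a 2 = a % 2 := by rw [Int.fmod_eq_emod]; norm_num
      have h1 : a % 2 = 1 := by
        simp only [PySem.Int.mod, h2] at ha; omega
      have hd : (PySem.Int.mod a 2 = 0) = False := by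
        simp [PySem.Int.mod, h2, h1]
      simp only [hd, ih]
      cases t.reverse.find? (fun n => PySem.Int.mod n 2 ≠ 0) <;>
        simp [h1]

-- ===== VERDICT (by name: the statement is the Claim_ definition above) =====
theorem elabora_numeri_spec : Claim_equal_elabora_numeri := by
  intro numeri _
  unfold Spec_elabora_numeri elabora_numeri elabora_numeri_alt
  rw [pv_loop_char]
  cases numeri.reverse.find? (fun n => PySem.Int.mod n 2 ≠ 0) <;> simp
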